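-- pv_equiv track=rewrite | github.com/janakano/codewars-exercices | 7kyu/simple-fun-182-happy-g.py | happy_g
-- ===== SOURCE A (Python) =====
-- def happy_g(st):
--     if 'g' not in st:
--         return True  # if no 'g', return True
--
--     last_g_index = -2  # initialize to a value that ensures the first 'g' is not considered adjacent
--     for i, char in enumerate(st):
--         if char == 'g':
--             if i - last_g_index > 1:  # If this 'g' is not adjacent to the previous 'g'
--                 if i == len(st) - 1 or st[i + 1] != 'g':  # if it's the last char or next char is not 'g'
--                     return False  # This 'g' is alone
--             last_g_index = i  # update the index of the last seen 'g'
--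
--     return True
-- ===== SOURCE B (Python) =====
-- def happy_g(st):
--     run = 0
--     for c in st:
--         if c == 'g':
--             run += 1
--         else:
--             if run == 1:
--                 return False
--             run = 0
--     return run != 1
-- ===== Notes on version B (the rewrite author's own statement) =====
-- stated objective: simpler
-- what changed: B replaces A's last_g_index bookkeeping with lookahead by a run-length counter: it counts each maximal run of 'g's and fails exactly when a run has length 1.
import Mathlib
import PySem

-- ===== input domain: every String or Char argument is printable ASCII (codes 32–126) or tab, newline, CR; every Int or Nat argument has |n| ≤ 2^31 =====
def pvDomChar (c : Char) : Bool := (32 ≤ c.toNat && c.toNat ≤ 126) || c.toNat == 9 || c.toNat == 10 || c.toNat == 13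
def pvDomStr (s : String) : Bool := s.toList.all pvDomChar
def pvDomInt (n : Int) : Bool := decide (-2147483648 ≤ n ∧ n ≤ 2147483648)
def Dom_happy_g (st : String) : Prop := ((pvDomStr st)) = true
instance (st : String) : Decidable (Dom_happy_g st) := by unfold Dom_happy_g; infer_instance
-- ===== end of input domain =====

-- B replaces A's last_g_index bookkeeping + lookahead with a run-length counter (simpler, same O(n) cost).


-- ===== PORT A =====
-- A's for-loop over enumerate(st): structural recursion over the character list carrying
-- the index i and last_g_index; `i == len(st)-1 or st[i+1] != 'g'` is exactly
-- `rest.head? ≠ some 'g'` for the remaining list rest.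
def happyGLoopA : List Char → Int → Int → Bool
  | [], _, _ => true
  | c :: rest, i, lastg =>
    if c = 'g' then
      if i - lastg > 1 then
        if rest.head? ≠ some 'g' then false
        else happyGLoopA rest (i + 1) i
      else happyGLoopA rest (i + 1) i
    else happyGLoopA rest (i + 1) lastg

def happy_g (st : String) : Bool :=
  if ¬ st.toList.contains 'g' then true
  else happyGLoopA st.toList 0 (-2)

-- ===== PORT B =====
-- Source B: single pass with a run-length counter `run`.
def happyGLoopB : List Char → Int → Bool
  | [], run => run ≠ 1
  | c :: rest, run =>
    if c = 'g' then happyGLoopB rest (run + 1)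
    else if run = 1 then false
    else happyGLoopB rest 0

def happy_g_alt (st : String) : Bool := happyGLoopB st.toList 0

-- ===== PRECONDITION & SPEC =====
def Spec_happy_g (st : String) (out : Bool) : Prop := out = happy_g_alt st
instance (st : String) (out : Bool) : Decidable (Spec_happy_g st out) := by unfold Spec_happy_g; infer_instance

-- ===== CLAIM (what is proved, stated in full; the proofs are below) =====
def Claim_equal_happy_g : Prop := ∀ (st : String), Dom_happy_g st → Spec_happy_g st (happy_g st)

-- ===== LEMMAS AND PROOFS =====

-- Invariant tying A's (i, last_g_index) state to B's run counter.
lemma happyG_loop_eq (l : List Char) : ∀ (i lastg run : Int),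
    ((run = 0 ∧ lastg ≤ i - 2) ∨
     (run = 1 ∧ lastg = i - 1 ∧ l.head? = some 'g') ∨
     (2 ≤ run ∧ lastg = i - 1)) →
    happyGLoopA l i lastg = happyGLoopB l run := by
  induction l with
  | nil =>
    intro i lastg run h
    simp [happyGLoopA, happyGLoopB]
    rcases h with ⟨h0, _⟩ | ⟨_, _, hh⟩ | ⟨h2, _⟩
    · omega
    · simp at hh
    · omega
  | cons c rest ih =>
    intro i lastg run h
    by_cases hc : c = 'g'
    · subst hc
      rcases h with ⟨h0, hl⟩ | ⟨h1, hl, _⟩ | ⟨h2, hl⟩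
      · -- first 'g' of a run: A looks ahead, B moves to run = 1
        have hgt : (0:Int) - lastg + i > 1 := by omega
        cases rest with
        | nil => simp [happyGLoopA, happyGLoopB]; omega
        | cons d rest' =>
          by_cases hd : d = 'g'
          · subst hd
            simp only [happyGLoopA, List.head?]
            rw [if_pos trivial, if_pos (by omega), if_neg (by simp)]
            exact ih (i + 1) i (run + 1) (Or.inr (Or.inl ⟨by omega, by omega, rfl⟩))
          · simp only [happyGLoopA, happyGLoopB, List.head?]
            rw [if_pos trivial, if_pos (by omega), if_pos (by simp [hd]),
                if_pos trivial, if_neg hd, if_pos (by omega)]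
      · -- previous char was a lone-so-far 'g' with verified 'g' lookahead
        simp only [happyGLoopA]
        rw [if_pos trivial, if_neg (by omega)]
        exact ih (i + 1) i (run + 1)
          (Or.inr (Or.inr ⟨by omega, by omega⟩))
      · simp only [happyGLoopA]
        rw [if_pos trivial, if_neg (by omega)]
        exact ih (i + 1) i (run + 1) (Or.inr (Or.inr ⟨by omega, by omega⟩))
    · rcases h with ⟨h0, hl⟩ | ⟨h1, hl, hh⟩ | ⟨h2, hl⟩
      · simp only [happyGLoopA, happyGLoopB]
        rw [if_neg hc, if_neg hc, if_neg (by omega)]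
        exact ih (i + 1) lastg 0 (Or.inl ⟨rfl, by omega⟩)
      · exact absurd (by simpa using hh) hc
      · simp only [happyGLoopA, happyGLoopB]
        rw [if_neg hc, if_neg hc, if_neg (by omega)]
        exact ih (i + 1) lastg 0 (Or.inl ⟨rfl, by omega⟩)

lemma happyGLoopB_no_g (l : List Char) (h : ¬ l.contains 'g') :
    happyGLoopB l 0 = true := by
  induction l with
  | nil => simp [happyGLoopB]
  | cons c rest ih =>
    simp only [List.contains_cons, Bool.or_eq_true, not_or] at h
    have hc : c ≠ 'g' := by
      intro e; exact h.1 (by simp [e])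
    simp only [happyGLoopB]
    rw [if_neg hc, if_neg (by omega)]
    exact ih h.2

-- ===== VERDICT (by name: the statement is the Claim_ definition above) =====
theorem happy_g_spec : Claim_equal_happy_g := by
  intro st _
  show happy_g st = happy_g_alt st
  unfold happy_g happy_g_alt
  by_cases hg : st.toList.contains 'g'
  · rw [if_neg (by simpa using hg)]
    exact happyG_loop_eq st.toList 0 (-2) 0 (Or.inl ⟨rfl, by omega⟩)
  · rw [if_pos (by simpa using hg), happyGLoopB_no_g st.toList hg]
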